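-- pv_equiv track=rewrite | github.com/stevenstonie/code-cluster | python/small applications/two-dimensional_parity_and_cyclic_redundancy_checking.py | printTheParityMatrix
-- ===== SOURCE A (Python) =====
-- def printTheParityMatrix(input):
--     nbOfLines = len(input) // 7
--
--     parityMatrix = [input[i:i+7] + ('  1' if input[i:i+7].count('1') %
--                                     2 == 0 else '  0') for i in range(0, len(input), 7)]
--
--     newRow = ''.join(['1' if sum(1 for i in range(
--         nbOfLines) if parityMatrix[i][j] == '1') % 2 == 0 else '0' for j in range(7)])
--     parityMatrix += ['', newRow]
--
--     return '\n'.join(parityMatrix)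
-- ===== SOURCE B (Python) =====
-- def printTheParityMatrix(input):
--     nbOfLines = len(input) // 7
--     numChunks = (len(input) + 6) // 7
--     rows = []
--     counters = [0] * 7
--     for idx in range(numChunks):
--         chunk = input[7 * idx: 7 * idx + 7]
--         rows.append(chunk + ('  1' if chunk.count('1') % 2 == 0 else '  0'))
--         if idx < nbOfLines:
--             counters = [c + (ch == '1') for c, ch in zip(counters, chunk)]
--     newRow = ''.join('1' if c % 2 == 0 else '0' for c in counters)
--     return '\n'.join(rows + ['', newRow])
-- ===== Notes on version B (the rewrite author's own statement) =====
-- stated objective: alternative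
-- what changed: A rescans the whole row matrix once per column (7 nested passes over parityMatrix) to compute the column-parity row; B makes a single pass over the rows, folding each full row into seven running column counters and deriving the parity row from the counters.
import Mathlib
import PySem

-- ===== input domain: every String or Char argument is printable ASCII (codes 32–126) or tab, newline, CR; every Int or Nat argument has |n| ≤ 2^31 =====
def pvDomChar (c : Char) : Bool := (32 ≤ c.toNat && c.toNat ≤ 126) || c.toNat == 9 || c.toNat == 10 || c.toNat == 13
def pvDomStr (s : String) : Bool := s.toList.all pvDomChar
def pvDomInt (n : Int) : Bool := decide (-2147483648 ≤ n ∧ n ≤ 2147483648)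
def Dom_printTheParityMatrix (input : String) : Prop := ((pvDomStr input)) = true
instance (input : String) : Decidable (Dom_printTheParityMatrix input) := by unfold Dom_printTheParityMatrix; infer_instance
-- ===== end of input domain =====

-- B replaces A's per-column rescan of the row matrix by a single pass over the rows that
-- folds each full row into seven running column counters (objective: alternative decomposition).

-- ===== PORT A =====
-- Literal port of A. Python's parityMatrix[i][j] is ported with pyGetD; here i < len//7
-- and j < 7 are always in range (full rows have 7 data chars), so this is exact.
def printTheParityMatrix (input : String) : String :=
  let s := input.toList
  let n : Int := (s.length : Int)
  let nbOfLines : Int := PySem.Int.floordiv n 7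
  let parityMatrix : List (List Char) :=
    (PySem.List.pyRange 0 n 7).map (fun i =>
      PySem.List.slice s (some i) (some (i + 7)) ++
        (if PySem.Chars.count (PySem.List.slice s (some i) (some (i + 7))) ['1'] % 2 == 0
         then "  1".toList else "  0".toList))
  let newRow : List Char :=
    PySem.Chars.join [] ((PySem.List.pyRange 0 7).map (fun j =>
      if PySem.Int.mod
           ((PySem.List.pyRange 0 nbOfLines).foldl
             (fun acc i =>
               if PySem.List.pyGetD (PySem.List.pyGetD parityMatrix i []) j ' ' == '1'
               then acc + 1 else acc)
             (0 : Int)) 2 == 0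
      then ['1'] else ['0']))
  String.ofList (PySem.Chars.join ['\n'] (parityMatrix ++ [[], newRow]))

-- ===== PORT B =====
def printTheParityMatrix_alt (input : String) : String :=
  let s := input.toList
  let nbOfLines := s.length / 7
  let numChunks := (s.length + 6) / 7
  let st := (List.range numChunks).foldl
    (fun (acc : List (List Char) × List Nat) idx =>
      let chunk := (s.drop (7 * idx)).take 7
      (acc.1 ++ [chunk ++ (if PySem.Chars.count chunk ['1'] % 2 == 0
                           then "  1".toList else "  0".toList)],
       if idx < nbOfLines then
         List.zipWith (fun c ch => if ch == '1' then c + 1 else c) acc.2 chunk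
       else acc.2))
    ([], List.replicate 7 0)
  let newRow := st.2.map (fun c => if c % 2 == 0 then '1' else '0')
  String.ofList (PySem.Chars.join ['\n'] (st.1 ++ [[], newRow]))


-- ===== PRECONDITION & SPEC =====
def Spec_printTheParityMatrix (input : String) (out : String) : Prop := out = printTheParityMatrix_alt input
instance (input : String) (out : String) : Decidable (Spec_printTheParityMatrix input out) := by unfold Spec_printTheParityMatrix; infer_instance

-- ===== CLAIM (what is proved, stated in full; the proofs are below) =====
def Claim_equal_printTheParityMatrix : Prop := ∀ (input : String), Dom_printTheParityMatrix input → Spec_printTheParityMatrix input (printTheParityMatrix input)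

-- ===== LEMMAS AND PROOFS =====
theorem pv_filter_range (m n : Nat) (h : m ≤ n) :
    List.filter (fun x => decide (x < m)) (List.range n) = List.range m := by
  obtain ⟨k, rfl⟩ := Nat.exists_eq_add_of_le h
  rw [List.range_add, List.filter_append, List.filter_eq_self.2, List.filter_eq_nil_iff.2, List.append_nil]
  · intro a ha; simp only [List.mem_map, List.mem_range] at ha; obtain ⟨b, hb, rfl⟩ := ha; simp
  · intro a ha; simp [List.mem_range.1 ha]

theorem pv_range7 (L : Nat) : PySem.List.pyRange 0 (L:Int) 7 = (List.range ((L+6)/7)).map (fun k => ((7*k : Nat) : Int)) := by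
  rw [PySem.List.pyRange_of_pos 0 (L:Int) (by norm_num)]
  have h : (if (0:Int) < (L:Int) then (((L:Int) - 0 + 7 - 1)/7).toNat else 0) = (L+6)/7 := by
    split
    · have : ((L:Int) - 0 + 7 - 1) = ((L + 6 : Nat) : Int) := by push_cast; ring
      rw [this, show (7:Int) = ((7:Nat):Int) from rfl, ← Int.natCast_div, Int.toNat_natCast]
    · omega
  rw [h]
  exact List.map_congr_left (by intro k _; push_cast; ring)

theorem pv_slice (s : List Char) (k : Nat) :
    PySem.List.slice s (some ((7*k:Nat):Int)) (some (((7*k:Nat):Int)+7)) = (s.drop (7*k)).take 7 := by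
  have h : ((7*k:Nat):Int)+7 = ((7*k+7:Nat):Int) := by push_cast; ring
  rw [h, PySem.List.slice_natCast]
  congr 1
  omega

theorem pv_counters (ch : Nat → List Char) (m : Nat) (h : ∀ i, i < m → (ch i).length = 7)
    (g : Nat → Nat) :
    (List.range m).foldl
        (fun cs i => List.zipWith (fun c c' => if c' == '1' then c + 1 else c) cs (ch i))
        ((List.range 7).map g)
      = (List.range 7).map (fun j => g j + (List.range m).countP (fun i => (ch i).getD j ' ' == '1')) := by
  induction m generalizing g with
  | zero => simp
  | succ m ih =>
    rw [show List.range (m+1) = List.range m ++ [m] from List.range_succ,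
        List.foldl_append, ih (fun i hi => h i (by omega)), List.foldl_cons, List.foldl_nil]
    apply List.ext_getElem
    · simp [h m (by omega)]
    · intro j h1 h2
      have hj : j < 7 := by simpa using h2
      have hc : (ch m).length = 7 := h m (by omega)
      rw [List.getElem_zipWith]
      simp only [List.getElem_map, List.getElem_range, List.countP_append]
      have hg : (ch m).getD j ' ' = (ch m)[j]'(by omega) := by
        rw [List.getD_eq_getElem]
      simp only [List.countP_cons, List.countP_nil, hg]
      split <;> simp_all
      omega

theorem pv_join_bits (p : Nat → Bool) (l : List Nat) :
    PySem.Chars.join [] (l.map (fun j => if p j then ['1'] else ['0'])) = l.map (fun j => if p j then '1' else '0') := by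
  have h : (fun j => if p j then (['1'] : List Char) else ['0'])
      = (fun c => [c]) ∘ (fun j => if p j then '1' else '0') := by
    funext j; by_cases hp : p j <;> simp [hp]
  rw [h, ← List.map_map, PySem.Chars.join_nil_singletons]

theorem pv_main (input : String) : printTheParityMatrix input = printTheParityMatrix_alt input := by
  simp only [printTheParityMatrix, printTheParityMatrix_alt]
  set s := input.toList with hs
  set L := s.length with hL
  set nb := L / 7 with hnb
  set M := (L + 6) / 7 with hM
  set chunk : Nat → List Char := fun k => (s.drop (7*k)).take 7 with hchunk
  set tailf : List Char → List Char :=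
    fun c => if PySem.Chars.count c ['1'] % 2 == 0 then "  1".toList else "  0".toList with htf
  set row : Nat → List Char := fun k => chunk k ++ tailf (chunk k) with hrow
  have hnbM : nb ≤ M := by rw [hnb, hM]; omega
  have hclen : ∀ i, i < nb → (chunk i).length = 7 := by
    intro i hi
    rw [hchunk]
    simp only [List.length_take, List.length_drop]
    omega
  -- A's matrix
  have hA_rows : (PySem.List.pyRange 0 (L:Int) 7).map (fun i =>
      PySem.List.slice s (some i) (some (i + 7)) ++
        (if PySem.Chars.count (PySem.List.slice s (some i) (some (i + 7))) ['1'] % 2 == 0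
         then "  1".toList else "  0".toList)) = (List.range M).map row := by
    rw [pv_range7 L, List.map_map]
    refine List.map_congr_left ?_
    intro k _
    simp only [Function.comp, pv_slice s k, hrow, htf]
    rfl
  rw [hA_rows]
  have hfunB : (fun (acc : List (List Char) × List Nat) (idx : Nat) =>
      (acc.1 ++ [(s.drop (7*idx)).take 7 ++ (if PySem.Chars.count ((s.drop (7*idx)).take 7) ['1'] % 2 == 0 then "  1".toList else "  0".toList)],
       if idx < nb then List.zipWith (fun c ch => if ch == '1' then c + 1 else c) acc.2 ((s.drop (7*idx)).take 7) else acc.2))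
    = (fun (acc : List (List Char) × List Nat) (idx : Nat) =>
        ((fun (r : List (List Char)) (i : Nat) => r ++ [row i]) acc.1 idx,
         (fun (cs : List Nat) (i : Nat) => if i < nb then List.zipWith (fun c ch => if ch == '1' then c + 1 else c) cs (chunk i) else cs) acc.2 idx)) := rfl
  rw [hfunB]
  beta_reduce
  rw [PySem.List.foldl_prod_mk (f := fun (r : List (List Char)) (i : Nat) => r ++ [row i])
        (g := fun (cs : List Nat) (i : Nat) => if i < nb then List.zipWith (fun c ch => if ch == '1' then c + 1 else c) cs (chunk i) else cs)]
  rw [PySem.List.foldl_append_singleton_eq_map row (List.range M) []]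
  rw [PySem.List.foldl_ite_eq_foldl_filter (fun i => i < nb)
        (fun (cs : List Nat) (i : Nat) => List.zipWith (fun c ch => if ch == '1' then c + 1 else c) cs (chunk i))
        (List.range M) (List.replicate 7 0)]
  rw [pv_filter_range nb M hnbM]
  rw [show (List.replicate 7 (0:Nat)) = (List.range 7).map (fun _ => 0) from by simp [List.map_const']]
  rw [pv_counters chunk nb hclen (fun _ => 0)]
  simp only [List.nil_append, Nat.zero_add]
  have hnbInt : PySem.Int.floordiv ((L:Nat):Int) 7 = ((nb:Nat):Int) := by
    rw [hnb]; exact_mod_cast PySem.Int.floordiv_natCast L 7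
  rw [hnbInt, PySem.List.pyRange_zero_natCast nb,
      show (7:Int) = (((7:Nat)):Int) from rfl, PySem.List.pyRange_zero_natCast 7]
  simp only [List.foldl_map, List.map_map, PySem.List.foldl_if_add_one, Function.comp_def]
  rw [pv_join_bits]
  refine congrArg _ (congrArg _ ?_)
  rw [List.append_right_inj]
  refine congrArg _ (congrArg (fun x => [x]) ?_)
  refine List.map_congr_left ?_
  intro j hj
  have hjlt7 : j < 7 := List.mem_range.1 hj
  have hcnt : List.countP
      (fun i : Nat => PySem.List.pyGetD (PySem.List.pyGetD (List.map row (List.range M)) (↑i) []) (↑j) ' ' == '1')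
      (List.range nb)
      = List.countP (fun i => (chunk i).getD j ' ' == '1') (List.range nb) := by
    refine List.countP_congr ?_
    intro i hi
    have hilt : i < nb := List.mem_range.1 hi
    have e1 : PySem.List.pyGetD (List.map row (List.range M)) ((i:Nat):Int) [] = row i := by
      rw [PySem.List.pyGetD_natCast]
      exact PySem.List.getD_map_range row M i [] (lt_of_lt_of_le hilt hnbM)
    have hlen : (chunk i).length = 7 := hclen i hilt
    have e2 : PySem.List.pyGetD (row i) ((j:Nat):Int) ' ' = (chunk i).getD j ' ' := by
      rw [PySem.List.pyGetD_natCast]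
      have hjlt : j < (chunk i).length := by omega
      have hjlt2 : j < (row i).length := by
        rw [hrow]; simp only [List.length_append]; omega
      rw [List.getD_eq_getElem _ _ hjlt2, List.getD_eq_getElem _ _ hjlt]
      simp only [hrow]
      exact List.getElem_append_left hjlt
    rw [e1, e2]
  rw [hcnt]
  rw [show (2:Int) = (((2:Nat)):Int) from rfl]
  rw [show ((0:Int) + (List.countP (fun i => (chunk i).getD j ' ' == '1') (List.range nb) : Nat))
        = ((List.countP (fun i => (chunk i).getD j ' ' == '1') (List.range nb) : Nat) : Int) from (zero_add _)]
  rw [PySem.Int.mod_natCast]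
  have hpar : ∀ c : Nat, (((c % 2 : Nat) : Int) == (0:Int)) = ((c % 2) == 0) := by
    intro c
    by_cases h : c % 2 = 0
    · simp [h]
    · simp [h]
      omega
  rw [hpar]

-- ===== VERDICT (by name: the statement is the Claim_ definition above) =====
theorem printTheParityMatrix_spec : Claim_equal_printTheParityMatrix := by
  intro input _
  exact pv_main input
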